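-- pv_equiv track=rewrite | github.com/judedcunha/Tavern-Research-Assessement | wiki.py | is_regular_link
-- ===== SOURCE A (Python) =====
-- META_PREFIXES = [
--     "Wikipedia:", "Category:", "Template:", "Help:",
--     "Portal:", "Draft:", "Module:", "File:", "Talk:",
--     "User:", "MediaWiki:", "TimedText:", "Book:",
-- ]
--
-- META_LINK_SUBSTRINGS = [
--     "disambiguation",
-- ]
--
-- def is_regular_link(page_name):
--     """Filter links by namespace prefix and link-level meta patterns."""
--     lower = page_name.lower()
--     for prefix in META_PREFIXES:
--         if lower.startswith(prefix.lower()):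
--             return False
--     for substring in META_LINK_SUBSTRINGS:
--         if substring in lower:
--             return False
--     return True
-- ===== SOURCE B (Python) =====
-- NAMESPACES = frozenset((
--     "wikipedia", "category", "template", "help",
--     "portal", "draft", "module", "file", "talk",
--     "user", "mediawiki", "timedtext", "book",
-- ))
--
-- def is_regular_link(page_name):
--     """Filter links by namespace prefix and link-level meta patterns."""
--     lower = page_name.lower()
--     head, sep, _ = lower.partition(":")
--     return not (sep and head in NAMESPACES) and "disambiguation" not in lower
-- ===== Notes on version B (the rewrite author's own statement) =====
-- stated objective: idiomatic
-- what changed: Instead of an early-return loop scanning 13 startswith prefixes, B partitions the lowercased name at the first colon once, decides membership of the colon-stripped head in a frozenset, and returns one boolean expression (no loops, no branches).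
import Mathlib
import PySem

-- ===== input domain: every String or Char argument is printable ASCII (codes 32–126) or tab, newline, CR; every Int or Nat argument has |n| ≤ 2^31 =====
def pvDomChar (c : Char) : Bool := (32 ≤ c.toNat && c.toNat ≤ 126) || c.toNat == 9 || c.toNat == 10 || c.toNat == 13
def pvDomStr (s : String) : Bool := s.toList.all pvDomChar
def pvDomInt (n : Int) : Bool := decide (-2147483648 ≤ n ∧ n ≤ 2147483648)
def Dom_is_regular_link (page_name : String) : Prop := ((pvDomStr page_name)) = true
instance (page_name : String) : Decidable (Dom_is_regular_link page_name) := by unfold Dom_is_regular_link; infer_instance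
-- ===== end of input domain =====

-- B replaces A's early-return startswith loop by partitioning the lowercased name at the
-- first colon and deciding membership of the head in a namespace set, as one boolean expression.

-- ===== PORT A =====
def metaPrefixes : List String :=
  ["Wikipedia:", "Category:", "Template:", "Help:",
   "Portal:", "Draft:", "Module:", "File:", "Talk:",
   "User:", "MediaWiki:", "TimedText:", "Book:"]

def metaLinkSubstrings : List String := ["disambiguation"]

def is_regular_link (page_name : String) : Bool :=
  let lower := PySem.Str.lower page_name
  if metaPrefixes.any (fun prefix_ => PySem.Str.startswith lower (PySem.Str.lower prefix_)) then false
  else if metaLinkSubstrings.any (fun substring => PySem.Str.isIn substring lower) then false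
  else true

-- ===== PORT B =====
def namespaces : PySem.Set String :=
  PySem.Set.ofList
    ["wikipedia", "category", "template", "help",
     "portal", "draft", "module", "file", "talk",
     "user", "mediawiki", "timedtext", "book"]

def is_regular_link_alt (page_name : String) : Bool :=
  let lower := PySem.Str.lower page_name
  -- lower.partition(":"): head = text before the first colon, sep truthy iff a colon occurs (exact)
  let head : String := String.ofList (lower.toList.takeWhile (· != ':'))
  let sep : Bool := lower.toList.contains ':'
  !(sep && PySem.Set.contains namespaces head) && !(PySem.Str.isIn "disambiguation" lower)

-- ===== PRECONDITION & SPEC =====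
def Spec_is_regular_link (page_name : String) (out : Bool) : Prop := out = is_regular_link_alt page_name
instance (page_name : String) (out : Bool) : Decidable (Spec_is_regular_link page_name out) := by unfold Spec_is_regular_link; infer_instance

-- ===== CLAIM =====
def Claim_equal_is_regular_link : Prop := ∀ (page_name : String), Dom_is_regular_link page_name → Spec_is_regular_link page_name (is_regular_link page_name)

-- ===== LEMMAS AND PROOFS =====

-- the namespace names, as char lists, for the proofs
def nsCharLists : List (List Char) :=
  ["wikipedia".toList, "category".toList, "template".toList, "help".toList,
   "portal".toList, "draft".toList, "module".toList, "file".toList, "talk".toList,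
   "user".toList, "mediawiki".toList, "timedtext".toList, "book".toList]

lemma takeWhile_colon (ns t : List Char) (h : ':' ∉ ns) :
    (ns ++ ':' :: t).takeWhile (· != ':') = ns := by
  induction ns with
  | nil => simp
  | cons a ns ih =>
    have ha : a ≠ ':' := fun e => h (e ▸ List.mem_cons_self)
    have hns : ':' ∉ ns := fun e => h (List.mem_cons_of_mem _ e)
    simp [ha, ih hns]

lemma exists_colon_split (l : List Char) (h : ':' ∈ l) :
    ∃ t, l = l.takeWhile (· != ':') ++ ':' :: t := by
  induction l with
  | nil => cases h
  | cons a l ih =>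
    by_cases ha : a = ':'
    · exact ⟨l, by simp [ha, List.takeWhile]⟩
    · have hl : ':' ∈ l := by
        rcases List.mem_cons.mp h with e | e
        · exact absurd e.symm ha
        · exact e
      obtain ⟨t, ht⟩ := ih hl
      refine ⟨t, ?_⟩
      simp only [List.takeWhile, show (a != ':') = true by simpa using ha]
      simpa using ht

lemma prefix_colon_iff (l ns : List Char) (h : ':' ∉ ns) :
    (ns ++ [':']) <+: l ↔ ':' ∈ l ∧ l.takeWhile (· != ':') = ns := by
  constructor
  · rintro ⟨t, rfl⟩
    refine ⟨by simp, ?_⟩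
    rw [List.append_assoc, List.singleton_append, takeWhile_colon _ _ h]
  · rintro ⟨hmem, hta⟩
    obtain ⟨t, ht⟩ := exists_colon_split l hmem
    exact ⟨t, by rw [ht, hta, List.append_assoc, List.singleton_append]⟩

lemma any_prefix_eq (l : List Char) :
    nsCharLists.any (fun ns => PySem.Chars.startswith l (ns ++ [':']))
      = (l.contains ':' && decide (l.takeWhile (· != ':') ∈ nsCharLists)) := by
  have hns : ∀ ns ∈ nsCharLists, ':' ∉ ns := by decide
  rw [Bool.eq_iff_iff]
  simp only [Bool.and_eq_true, List.any_eq_true, PySem.Chars.startswith_iff,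
    List.contains_eq_mem, decide_eq_true_eq]
  constructor
  · rintro ⟨ns, hmem, hpre⟩
    obtain ⟨hc, hta⟩ := (prefix_colon_iff l ns (hns ns hmem)).mp hpre
    exact ⟨hc, hta ▸ hmem⟩
  · rintro ⟨hc, hmem⟩
    exact ⟨_, hmem, (prefix_colon_iff l _ (hns _ hmem)).mpr ⟨hc, rfl⟩⟩

lemma key (s : String) :
    metaPrefixes.any (fun prefix_ => PySem.Str.startswith s (PySem.Str.lower prefix_))
      = (s.toList.contains ':' &&
          PySem.Set.contains namespaces (String.ofList (s.toList.takeWhile (· != ':')))) := by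
  have hmap : metaPrefixes.map (fun p => (PySem.Str.lower p).toList)
      = nsCharLists.map (fun ns => ns ++ [':']) := by decide
  have hLHS : metaPrefixes.any (fun prefix_ => PySem.Str.startswith s (PySem.Str.lower prefix_))
      = nsCharLists.any (fun ns => PySem.Chars.startswith s.toList (ns ++ [':'])) := by
    calc metaPrefixes.any (fun p => PySem.Str.startswith s (PySem.Str.lower p))
        = (metaPrefixes.map (fun p => (PySem.Str.lower p).toList)).any
            (fun q => PySem.Chars.startswith s.toList q) := by
          rw [List.any_map]; simp [PySem.Str.startswith_eq, Function.comp_def]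
      _ = (nsCharLists.map (fun ns => ns ++ [':'])).any
            (fun q => PySem.Chars.startswith s.toList q) := by rw [hmap]
      _ = _ := by rw [List.any_map]; simp [Function.comp_def]
  have hcont : ∀ x : List Char, PySem.Set.contains namespaces (String.ofList x) = decide (x ∈ nsCharLists) := by
    intro x
    have hn : namespaces = ["wikipedia", "category", "template", "help",
      "portal", "draft", "module", "file", "talk",
      "user", "mediawiki", "timedtext", "book"] := by decide
    rw [hn]
    simp only [PySem.Set.contains, nsCharLists]
    simp [← String.toList_inj, String.toList_ofList]
  rw [hLHS, any_prefix_eq, hcont]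

-- ===== VERDICT =====
theorem is_regular_link_spec : Claim_equal_is_regular_link := by
  intro page_name _
  unfold Spec_is_regular_link
  simp only [is_regular_link, is_regular_link_alt, metaLinkSubstrings, List.any_cons,
    List.any_nil, Bool.or_false]
  rw [key (PySem.Str.lower page_name)]
  cases (PySem.Str.lower page_name).toList.contains ':' &&
      PySem.Set.contains namespaces
        (String.ofList ((PySem.Str.lower page_name).toList.takeWhile (· != ':'))) <;>
    cases PySem.Str.isIn "disambiguation" (PySem.Str.lower page_name) <;> rfl
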